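-- pv_equiv track=rewrite | github.com/reading-stiener/For-the-love-of-algos | Tests/goldman_02.22.2021.py | maxInversions
-- ===== SOURCE A (Python) =====
-- def maxInversions(arr):
--     count = 0
--     n = len(arr)
--     for i in range(1, n-1):
--         lt_count, gt_count = 0, 0
--         for j in range(i+1, n):
--             if arr[i] > arr[j]:
--                 lt_count += 1
--         for k in range(0, i):
--             if arr[i] < arr[k]:
--                 gt_count += 1
--         count += lt_count * gt_count
--     return count
-- ===== SOURCE B (Python) =====
-- def maxInversions(arr):
--     # Count strictly decreasing triples: one forward pass over pairs (j, k), j < k.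
--     # d2[k] = number of i < k with arr[i] > arr[k]; whenever arr[j] > arr[k] the
--     # d2[j] decreasing pairs ending at j each extend to a triple ending at k.
--     d2 = []
--     count = 0
--     for k in range(len(arr)):
--         c = 0
--         for j in range(k):
--             if arr[j] > arr[k]:
--                 c += 1
--                 count += d2[j]
--         d2.append(c)
--     return count
-- ===== Notes on version B (the rewrite author's own statement) =====
-- stated objective: alternative
-- what changed: A multiplies, for each middle element, a right-smaller count by a left-greater count gathered in two separate inner scans; B makes a single forward pass over pairs (j,k), maintaining per-index decreasing-pair counts d2 and extending each counted pair into a triple, never scanning to the right.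
import Mathlib
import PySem

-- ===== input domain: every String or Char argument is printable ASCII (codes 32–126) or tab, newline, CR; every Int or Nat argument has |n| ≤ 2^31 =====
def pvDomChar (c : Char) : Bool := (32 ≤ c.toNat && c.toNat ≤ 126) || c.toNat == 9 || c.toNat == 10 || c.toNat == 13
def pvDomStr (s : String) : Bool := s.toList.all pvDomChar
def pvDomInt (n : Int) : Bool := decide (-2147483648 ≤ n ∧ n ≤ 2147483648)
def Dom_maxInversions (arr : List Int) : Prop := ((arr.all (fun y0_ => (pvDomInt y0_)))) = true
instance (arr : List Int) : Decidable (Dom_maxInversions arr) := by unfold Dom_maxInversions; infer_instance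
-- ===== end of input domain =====

-- B replaces A's per-middle-element (right-smaller × left-greater) product with a single
-- forward double loop that extends counted decreasing pairs into triples (objective: alternative).

-- ===== PORT A =====
-- literal transliteration of Source A: for each middle i, count smaller elements to the
-- right and greater elements to the left, accumulate the product
def maxInversions (arr : List Int) : Int :=
  let n : Int := arr.length
  (PySem.List.pyRange 1 (n - 1) 1).foldl (fun count i =>
    let lt_count : Int :=
      (PySem.List.pyRange (i + 1) n 1).foldl (fun acc j =>
        if PySem.List.pyGetD arr i 0 > PySem.List.pyGetD arr j 0 then acc + 1 else acc) 0
    let gt_count : Int :=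
      (PySem.List.pyRange 0 i 1).foldl (fun acc k =>
        if PySem.List.pyGetD arr i 0 < PySem.List.pyGetD arr k 0 then acc + 1 else acc) 0
    count + lt_count * gt_count) 0

-- ===== PORT B =====
-- literal transliteration of Source B: state (d2, count); for each k, one scan of j < k
-- counting decreasing pairs ending at k and extending pairs ending at j
def maxInversions_alt (arr : List Int) : Int :=
  let res :=
    (PySem.List.pyRange 0 (arr.length : Int) 1).foldl (fun (st : List Int × Int) k =>
      let inner :=
        (PySem.List.pyRange 0 k 1).foldl (fun (p : Int × Int) j =>
          if PySem.List.pyGetD arr j 0 > PySem.List.pyGetD arr k 0 then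
            (p.1 + 1, p.2 + PySem.List.pyGetD st.1 j 0)
          else p) (0, st.2)
      (st.1 ++ [inner.1], inner.2)) ([], 0)
  res.2

-- ===== PRECONDITION & SPEC =====
def Spec_maxInversions (arr : List Int) (out : Int) : Prop := out = maxInversions_alt arr
instance (arr : List Int) (out : Int) : Decidable (Spec_maxInversions arr out) := by unfold Spec_maxInversions; infer_instance

-- ===== CLAIM (what is proved, stated in full; the proofs are below) =====
def Claim_equal_maxInversions : Prop := ∀ (arr : List Int), Dom_maxInversions arr → Spec_maxInversions arr (maxInversions arr)

-- ===== LEMMAS AND PROOFS =====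

-- pvG arr k = number of indices j < k with arr[j] > arr[k]  (left-greater count)
def pvG (arr : List Int) (k : Nat) : Int :=
  ∑ j ∈ Finset.range k, if arr.getD j 0 > arr.getD k 0 then 1 else 0

-- pvS arr i n = number of indices k with i < k < n and arr[i] > arr[k]  (right-smaller count)
def pvS (arr : List Int) (i n : Nat) : Int :=
  ∑ k ∈ Finset.Ico (i + 1) n, if arr.getD i 0 > arr.getD k 0 then 1 else 0

-- pvT arr m = B's running count after the first m outer iterations
def pvT (arr : List Int) (m : Nat) : Int :=
  ∑ k ∈ Finset.range m, ∑ j ∈ Finset.range k, if arr.getD j 0 > arr.getD k 0 then pvG arr j else 0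

lemma pv_sum_list_range (m : Nat) (g : Nat → Int) :
    ((List.range m).map g).sum = ∑ i ∈ Finset.range m, g i := by
  induction m with
  | zero => simp
  | succ k ih => rw [Finset.sum_range_succ, List.range_succ]; simp [ih]

-- a counting fold over pyRange ↑a ↑b is a Finset.Ico sum of 0/1 terms
lemma pv_count_fold (P : Int → Prop) [DecidablePred P] (a b : Nat) :
    (PySem.List.pyRange (a : Int) (b : Int) 1).foldl
      (fun acc j => if P j then acc + 1 else acc) 0
      = ∑ k ∈ Finset.Ico a b, if P (k : Int) then (1 : Int) else 0 := by
  have hf : (fun (acc : Int) j => if P j then acc + 1 else acc)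
      = (fun (acc : Int) j => acc + if P j then 1 else 0) := by
    funext acc j; split <;> simp
  rw [hf, PySem.List.foldl_add, PySem.List.pyRange_one, List.map_map, pv_sum_list_range]
  rw [Finset.sum_Ico_eq_sum_range (fun k => if P (k : Int) then (1 : Int) else 0) a b, Int.toNat_sub]
  push_cast
  simp [Function.comp]

-- A's first inner loop computes the right-smaller count
lemma pv_lt_fold (arr : List Int) (i : Nat) :
    (PySem.List.pyRange ((i : Int) + 1) (arr.length : Int) 1).foldl
      (fun acc j => if PySem.List.pyGetD arr (i : Int) 0 > PySem.List.pyGetD arr j 0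
        then acc + 1 else acc) 0
      = pvS arr i arr.length := by
  have e : ((i : Int) + 1) = ((i + 1 : Nat) : Int) := by push_cast; ring
  rw [e, pv_count_fold (fun j => PySem.List.pyGetD arr (i : Int) 0 > PySem.List.pyGetD arr j 0)]
  unfold pvS
  simp [PySem.List.pyGetD_natCast]

-- A's second inner loop computes the left-greater count
lemma pv_gt_fold (arr : List Int) (i : Nat) :
    (PySem.List.pyRange 0 (i : Int) 1).foldl
      (fun acc k => if PySem.List.pyGetD arr (i : Int) 0 < PySem.List.pyGetD arr k 0
        then acc + 1 else acc) 0
      = pvG arr i := by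
  have h := pv_count_fold
    (fun k => PySem.List.pyGetD arr (i : Int) 0 < PySem.List.pyGetD arr k 0) 0 i
  simp only [Nat.cast_zero] at h
  rw [h]
  unfold pvG
  rw [← Finset.range_eq_Ico]
  simp [PySem.List.pyGetD_natCast]

lemma pv_A_eq (arr : List Int) :
    maxInversions arr = ∑ i ∈ Finset.range arr.length, pvS arr i arr.length * pvG arr i := by
  unfold maxInversions
  dsimp only
  rw [PySem.List.foldl_add, PySem.List.pyRange_one, List.map_map, pv_sum_list_range]
  have ht : (((arr.length : Int) - 1) - 1).toNat = arr.length - 2 := by omega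
  rw [ht, zero_add]
  have hico := (Finset.sum_Ico_eq_sum_range
    (fun i => pvS arr i arr.length * pvG arr i) 1 (arr.length - 1))
  have ht2 : arr.length - 1 - 1 = arr.length - 2 := by omega
  rw [ht2] at hico
  have hsub : Finset.Ico 1 (arr.length - 1) ⊆ Finset.range arr.length := by
    intro x hx
    simp only [Finset.mem_Ico] at hx
    simp only [Finset.mem_range]
    omega
  have hzero : ∀ x ∈ Finset.range arr.length, x ∉ Finset.Ico 1 (arr.length - 1) →
      pvS arr x arr.length * pvG arr x = 0 := by
    intro x hx hnx
    simp only [Finset.mem_range] at hx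
    simp only [Finset.mem_Ico, not_and, not_lt] at hnx
    rcases Nat.eq_zero_or_pos x with h0 | h1
    · subst h0; simp [pvG]
    · have hx1 : x + 1 = arr.length := by have := hnx h1; omega
      simp [pvS, hx1]
  have hmid : (∑ i ∈ Finset.range (arr.length - 2),
        pvS arr (1 + i) arr.length * pvG arr (1 + i))
      = ∑ i ∈ Finset.range arr.length, pvS arr i arr.length * pvG arr i :=
    hico.symm.trans (Finset.sum_subset hsub hzero)
  refine Eq.trans ?_ hmid
  refine Finset.sum_congr rfl fun i hi => ?_
  have e : (1 : Int) + (i : Int) = ((1 + i : Nat) : Int) := by push_cast; ring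
  simp only [Function.comp_apply]
  rw [e, pv_lt_fold arr (1 + i), pv_gt_fold arr (1 + i)]

-- B's inner loop invariant: with d2 holding the pair counts of the first k elements,
-- one scan adds the new pair count and the extended triples
lemma pv_inner (arr : List Int) (k : Nat) (d2 : List Int)
    (hd2 : d2 = (List.range k).map (pvG arr)) (p : Nat) (hp : p ≤ k) (c t : Int) :
    (PySem.List.pyRange 0 (p : Int) 1).foldl
      (fun (q : Int × Int) j =>
        if PySem.List.pyGetD arr j 0 > PySem.List.pyGetD arr (k : Int) 0 then
          (q.1 + 1, q.2 + PySem.List.pyGetD d2 j 0)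
        else q) (c, t)
      = (c + ∑ j ∈ Finset.range p, (if arr.getD j 0 > arr.getD k 0 then (1 : Int) else 0),
         t + ∑ j ∈ Finset.range p, (if arr.getD j 0 > arr.getD k 0 then pvG arr j else 0)) := by
  induction p with
  | zero => simp [PySem.List.pyRange_one_eq_nil]
  | succ p ih =>
    have e : ((p + 1 : Nat) : Int) = (p : Int) + 1 := by push_cast; ring
    rw [e, PySem.List.pyRange_one_succ_right (by positivity), List.foldl_append,
      ih (by omega)]
    simp only [List.foldl_cons, List.foldl_nil, PySem.List.pyGetD_natCast, hd2,
      PySem.List.getD_map_range (pvG arr) k p 0 (by omega),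
      Finset.sum_range_succ]
    split <;> simp
    exact ⟨by ring, by ring⟩

-- B's outer loop invariant
lemma pv_outer (arr : List Int) (m : Nat) (hm : m ≤ arr.length) :
    (PySem.List.pyRange 0 (m : Int) 1).foldl (fun (st : List Int × Int) k =>
        let inner :=
          (PySem.List.pyRange 0 k 1).foldl (fun (p : Int × Int) j =>
            if PySem.List.pyGetD arr j 0 > PySem.List.pyGetD arr k 0 then
              (p.1 + 1, p.2 + PySem.List.pyGetD st.1 j 0)
            else p) (0, st.2)
        (st.1 ++ [inner.1], inner.2)) ([], 0)
      = ((List.range m).map (pvG arr), pvT arr m) := by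
  induction m with
  | zero => simp [PySem.List.pyRange_one_eq_nil, pvT]
  | succ m ih =>
    have e : ((m + 1 : Nat) : Int) = (m : Int) + 1 := by push_cast; ring
    rw [e, PySem.List.pyRange_one_succ_right (by positivity), List.foldl_append,
      ih (by omega)]
    simp only [List.foldl_cons, List.foldl_nil]
    rw [pv_inner arr m ((List.range m).map (pvG arr)) rfl m le_rfl 0 (pvT arr m)]
    rw [List.range_succ, List.map_append]
    simp [pvG, pvT, Finset.sum_range_succ]

lemma pv_B_eq (arr : List Int) : maxInversions_alt arr = pvT arr arr.length := by
  unfold maxInversions_alt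
  dsimp only
  rw [pv_outer arr arr.length le_rfl]

lemma pv_swap (n : Nat) (f : Nat → Nat → Int) :
    ∑ i ∈ Finset.range n, ∑ k ∈ Finset.Ico (i + 1) n, f i k
      = ∑ k ∈ Finset.range n, ∑ i ∈ Finset.range k, f i k := by
  induction n with
  | zero => simp
  | succ m ih =>
    rw [Finset.sum_range_succ, Finset.sum_range_succ]
    have h1 : ∀ i ∈ Finset.range m, ∑ k ∈ Finset.Ico (i + 1) (m + 1), f i k
        = ∑ k ∈ Finset.Ico (i + 1) m, f i k + f i m := by
      intro i hi
      exact Finset.sum_Ico_succ_top (by have := Finset.mem_range.mp hi; omega) _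
    rw [Finset.sum_congr rfl h1, Finset.sum_add_distrib, ih]
    simp

-- ===== VERDICT (by name: the statement is the Claim_ definition above) =====
theorem maxInversions_spec : Claim_equal_maxInversions := by
  intro arr _
  show maxInversions arr = maxInversions_alt arr
  rw [pv_A_eq, pv_B_eq]
  have h : ∀ i ∈ Finset.range arr.length,
      pvS arr i arr.length * pvG arr i
        = ∑ k ∈ Finset.Ico (i + 1) arr.length,
            if arr.getD i 0 > arr.getD k 0 then pvG arr i else 0 := by
    intro i _
    rw [pvS, Finset.sum_mul]
    refine Finset.sum_congr rfl fun k _ => ?_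
    split <;> simp
  rw [Finset.sum_congr rfl h,
    pv_swap arr.length (fun i k => if arr.getD i 0 > arr.getD k 0 then pvG arr i else 0), pvT]
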